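-- pv_equiv track=rewrite | github.com/DimasBo-home/fb_scraper_py | post.py | is_year_in_str
-- ===== SOURCE A (Python) =====
-- def is_year_in_str(s):
-- 	count = 0
-- 	i = 0
-- 	while count<4 and i<len(s) :
-- 		if s[i].isdigit():
-- 			count += 1
-- 		else:
-- 			count = 0
-- 		i +=1
-- 	if count==4:
-- 		return True
-- 	return False
-- ===== SOURCE B (Python) =====
-- def is_year_in_str(s):
--     return any(s[i:i+4].isdigit() for i in range(len(s) - 3))
-- ===== Notes on version B (the rewrite author's own statement) =====
-- stated objective: idiomatic
-- what changed: Replaced A's manual while-loop with a running digit counter (reset on non-digits, early exit at 4) by an idiomatic one-liner: any() over all 4-character slices tested with str.isdigit.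
import Mathlib
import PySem

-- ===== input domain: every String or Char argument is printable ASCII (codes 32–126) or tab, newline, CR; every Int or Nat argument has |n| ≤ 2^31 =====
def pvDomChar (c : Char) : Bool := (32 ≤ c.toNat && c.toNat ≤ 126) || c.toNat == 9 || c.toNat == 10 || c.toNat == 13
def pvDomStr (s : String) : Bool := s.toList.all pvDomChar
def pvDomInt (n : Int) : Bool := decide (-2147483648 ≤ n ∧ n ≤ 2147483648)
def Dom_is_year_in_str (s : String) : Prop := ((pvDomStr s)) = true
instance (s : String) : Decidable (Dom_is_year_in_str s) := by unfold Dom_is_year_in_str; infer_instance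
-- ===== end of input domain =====

-- B replaces A's running digit-counter scan by an idiomatic any() over all 4-character windows (same cost; objective: idiomatic).

-- ===== PORT A =====
-- the while loop: state (count); stops when count = 4 or the string is exhausted
def pvCountLoop : List Char → Nat → Nat
  | [], count => count
  | c :: rest, count =>
    if count < 4 then
      pvCountLoop rest (if PySem.Chars.isdigit c then count + 1 else 0)
    else count

def is_year_in_str (s : String) : Bool := pvCountLoop s.toList 0 == 4

-- ===== PORT B =====
def is_year_in_str_alt (s : String) : Bool :=
  (PySem.List.pyRange 0 ((PySem.Str.len s : Int) - 3) 1).any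
    (fun i => PySem.Str.strIsdigit (PySem.Str.slice s (some i) (some (i + 4))))

-- ===== PRECONDITION & SPEC =====
def Spec_is_year_in_str (s : String) (out : Bool) : Prop := out = is_year_in_str_alt s
instance (s : String) (out : Bool) : Decidable (Spec_is_year_in_str s out) := by unfold Spec_is_year_in_str; infer_instance

-- ===== CLAIM (what is proved, stated in full; the proofs are below) =====
def Claim_equal_is_year_in_str : Prop := ∀ (s : String), Dom_is_year_in_str s → Spec_is_year_in_str s (is_year_in_str s)

-- ===== LEMMAS AND PROOFS =====

-- "the first n characters of l exist and are all digits"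
def pvWin (l : List Char) (n : Nat) : Bool :=
  (l.take n).all PySem.Chars.isdigit && decide (n ≤ l.length)

-- "some suffix of l starts with 4 digits" — the common characterisation of both ports
def pvHasRun : List Char → Bool
  | [] => false
  | c :: rest => pvWin (c :: rest) 4 || pvHasRun rest

theorem pvWin_mono {l : List Char} {m n : Nat} (hmn : m ≤ n) (h : pvWin l n = true) :
    pvWin l m = true := by
  simp only [pvWin, Bool.and_eq_true, List.all_eq_true, decide_eq_true_eq] at h ⊢
  refine ⟨fun x hx => h.1 x ?_, le_trans hmn h.2⟩
  · have : l.take m = (l.take n).take m := by rw [List.take_take, Nat.min_eq_left hmn]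
    exact List.take_subset _ _ (this ▸ hx)

theorem pvWin_cons (c : Char) (rest : List Char) (n : Nat) :
    pvWin (c :: rest) (n + 1) = (PySem.Chars.isdigit c && pvWin rest n) := by
  simp [pvWin, Bool.and_assoc]

theorem pvWin_absorb (l : List Char) : (pvWin l 4 || pvHasRun l) = pvHasRun l := by
  cases l with
  | nil => simp [pvWin, pvHasRun]
  | cons c rest => simp [pvHasRun]

theorem pvCountLoop_eq (l : List Char) : ∀ c : Nat, c ≤ 4 →
    ((pvCountLoop l c == 4) = (pvWin l (4 - c) || pvHasRun l)) := by
  induction l with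
  | nil =>
    intro c hc
    simp only [pvCountLoop, pvHasRun, pvWin, Bool.or_false, List.take_nil, List.all_nil,
      Bool.true_and, List.length_nil]
    rcases Nat.lt_or_ge c 4 with h | h
    · have h1 : (c == 4) = false := by simp; omega
      have h2 : ¬ (4 - c ≤ 0) := by omega
      simp [h1, h2]
    · have hc4 : c = 4 := le_antisymm hc h
      simp [hc4]
  | cons ch rest ih =>
    intro c hc
    by_cases h4 : c < 4
    · have hsub : 4 - c = (3 - c) + 1 := by omega
      rw [pvCountLoop, if_pos h4, hsub, pvWin_cons]
      by_cases hd : PySem.Chars.isdigit ch = true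
      · rw [if_pos hd, ih (c + 1) (by omega), hd]
        have h31 : 4 - (c + 1) = 3 - c := by omega
        rw [h31]
        show _ = (_ || pvHasRun (ch :: rest))
        rw [pvHasRun]
        have hw4 : pvWin (ch :: rest) 4 = pvWin rest 3 := by
          have : (4 : Nat) = 3 + 1 := rfl
          rw [this, pvWin_cons, hd, Bool.true_and]
        rw [hw4, Bool.true_and]
        by_cases h3 : pvWin rest 3 = true
        · have := pvWin_mono (show 3 - c ≤ 3 by omega) h3
          simp [this, h3]
        · simp [Bool.eq_false_iff.mpr h3]
      · have hd' : PySem.Chars.isdigit ch = false := Bool.eq_false_iff.mpr hd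
        rw [if_neg hd, ih 0 (by omega), hd', Bool.false_and, Bool.false_or]
        show (pvWin rest (4 - 0) || pvHasRun rest) = pvHasRun (ch :: rest)
        rw [pvHasRun]
        have hw4 : pvWin (ch :: rest) 4 = false := by
          have : (4 : Nat) = 3 + 1 := rfl
          rw [this, pvWin_cons, hd', Bool.false_and]
        rw [hw4, Bool.false_or]
        exact pvWin_absorb rest
    · have hc4 : c = 4 := by omega
      subst hc4
      rw [pvCountLoop, if_neg h4]
      simp [pvWin]

theorem pvA_eq (s : String) : is_year_in_str s = pvHasRun s.toList := by
  rw [is_year_in_str, pvCountLoop_eq s.toList 0 (by omega), Nat.sub_zero, pvWin_absorb]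

theorem pvHasRun_short {l : List Char} (h : l.length < 4) : pvHasRun l = false := by
  induction l with
  | nil => rfl
  | cons c rest ih =>
    simp only [List.length_cons] at h
    rw [pvHasRun]
    have hw : pvWin (c :: rest) 4 = false := by
      simp only [pvWin, List.length_cons]
      have hlen : ¬ (4 ≤ rest.length + 1) := by omega
      simp [hlen]
    rw [hw, Bool.false_or]
    exact ih (by omega)

theorem pvWindow_isdigit {l : List Char} (h : 4 ≤ l.length) :
    PySem.Chars.strIsdigit (l.take 4) = pvWin l 4 := by
  cases l with
  | nil => simp at h
  | cons x t =>
    simp only [List.length_cons] at h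
    simp [PySem.Chars.strIsdigit, pvWin]
    intro _ _
    omega

theorem pvRangeAny (l : List Char) :
    ((List.range (l.length - 3)).any
      (fun k => PySem.Chars.strIsdigit ((l.drop k).take 4))) = pvHasRun l := by
  induction l with
  | nil => rfl
  | cons ch rest ih =>
    by_cases hm : rest.length < 3
    · have h0 : (ch :: rest).length - 3 = 0 := by simp; omega
      rw [h0]
      have : pvHasRun (ch :: rest) = false := pvHasRun_short (by simp; omega)
      simp [this]
    · have hsub : (ch :: rest).length - 3 = (rest.length - 3) + 1 := by simp; omega
      rw [hsub, List.range_succ_eq_map, List.any_cons, List.any_map]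
      simp only [Function.comp_def, List.drop_succ_cons, List.drop_zero]
      rw [ih, pvWindow_isdigit (by simp; omega)]
      conv_rhs => rw [pvHasRun]

theorem pvB_eq (s : String) : is_year_in_str_alt s = pvHasRun s.toList := by
  rw [is_year_in_str_alt]
  have hlen : ((PySem.Str.len s : Int) - 3) = ((s.toList.length : Int) - 3) := by
    simp [PySem.Str.len_eq]
  rw [hlen, PySem.List.pyRange_one, List.any_map]
  have htn : (((s.toList.length : Int) - 3 - 0).toNat) = s.toList.length - 3 := by omega
  rw [htn, ← pvRangeAny s.toList]
  refine List.any_congr rfl (fun k => ?_)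
  have hslice : PySem.Str.slice s (some ((0 : Int) + (k : Int))) (some ((0 : Int) + (k : Int) + 4))
      = String.ofList (PySem.List.slice s.toList (some (k : Int)) (some ((k : Int) + (4 : Nat)))) := by
    simp [PySem.Str.slice]
  rw [Function.comp_apply, hslice, PySem.List.slice_natCast_add]
  simp [PySem.Str.strIsdigit_eq]

-- ===== VERDICT (by name: the statement is the Claim_ definition above) =====
theorem is_year_in_str_spec : Claim_equal_is_year_in_str := by
  intro s _
  show is_year_in_str s = is_year_in_str_alt s
  rw [pvA_eq, pvB_eq]
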